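-- pv_equiv track=rewrite | github.com/yeongseon-books/database-systems-101 | en/10-oltp-and-olap.py | column_store_aggregate
-- ===== SOURCE A (Python) =====
-- from collections import defaultdict
--
-- def column_store_aggregate(
--     rows: list[tuple[int, int, str, int, str]],
-- ) -> list[tuple[str, int]]:
--     status = [r[2] for r in rows]
--     total = [r[3] for r in rows]
--     country = [r[4] for r in rows]
--     agg: dict[str, int] = defaultdict(int)
--     for i in range(len(rows)):
--         if status[i] == "paid":
--             agg[country[i]] += total[i]
--     return sorted(agg.items())
-- ===== SOURCE B (Python) =====
-- def column_store_aggregate(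
--     rows: list[tuple[int, int, str, int, str]],
-- ) -> list[tuple[str, int]]:
--     paid = [r for r in rows if r[2] == "paid"]
--     countries = sorted({r[4] for r in paid})
--     return [(c, sum(r[3] for r in paid if r[4] == c)) for c in countries]
-- ===== Notes on version B (the rewrite author's own statement) =====
-- stated objective: simpler
-- what changed: Replaces the column materialization + defaultdict indexed loop with a row-wise filter of paid rows, a sorted set of their countries, and a per-country sum comprehension (no dict, no index arithmetic).
import Mathlib
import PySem

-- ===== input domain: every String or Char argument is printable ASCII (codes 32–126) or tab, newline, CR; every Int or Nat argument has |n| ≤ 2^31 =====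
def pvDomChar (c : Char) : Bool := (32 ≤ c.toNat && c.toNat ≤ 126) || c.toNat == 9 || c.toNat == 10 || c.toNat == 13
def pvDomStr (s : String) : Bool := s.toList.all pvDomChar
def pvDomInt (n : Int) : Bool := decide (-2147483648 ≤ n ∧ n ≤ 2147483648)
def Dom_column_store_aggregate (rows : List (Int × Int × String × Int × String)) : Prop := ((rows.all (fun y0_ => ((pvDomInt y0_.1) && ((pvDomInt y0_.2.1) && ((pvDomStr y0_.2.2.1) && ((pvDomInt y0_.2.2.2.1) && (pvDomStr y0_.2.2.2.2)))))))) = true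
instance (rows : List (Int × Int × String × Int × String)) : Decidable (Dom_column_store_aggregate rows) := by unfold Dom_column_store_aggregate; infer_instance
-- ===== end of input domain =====

-- B replaces A's column materialization + defaultdict indexed loop with a filter of the paid
-- rows, a sorted set of their countries, and a per-country sum (simpler; not claimed faster).


-- ===== PORT A =====
-- rows r = (id, cust, status, total, country): r.2.2.1 = r[2], r.2.2.2.1 = r[3], r.2.2.2.2 = r[4]
def column_store_aggregate (rows : List (Int × Int × String × Int × String)) : List (String × Int) :=
  let status := rows.map (fun r => r.2.2.1)
  let total := rows.map (fun r => r.2.2.2.1)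
  let country := rows.map (fun r => r.2.2.2.2)
  let agg : PySem.Dict String Int :=
    (PySem.List.pyRange 0 (PySem.List.len rows)).foldl
      (fun d i =>
        if PySem.List.pyGetD status i "" == "paid" then
          -- defaultdict(int): agg[country[i]] += total[i]; indices of range(len(rows)) are in range, so pyGetD is exact
          d.modify (PySem.List.pyGetD country i "") 0 (· + PySem.List.pyGetD total i 0)
        else d)
      PySem.Dict.empty
  -- sorted(agg.items()): Python compares the (country, sum) tuples lexicographically
  PySem.List.sorted2 agg.items (fun p => p.1) (fun p => p.2) false

-- ===== PORT B =====
def column_store_aggregate_alt (rows : List (Int × Int × String × Int × String)) : List (String × Int) :=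
  let paid := rows.filter (fun r => r.2.2.1 == "paid")
  let countries := PySem.List.sorted (PySem.Set.ofList (paid.map (fun r => r.2.2.2.2))) (fun c => c) false
  countries.map (fun c =>
    (c, (paid.foldl (fun s r => if r.2.2.2.2 == c then s + r.2.2.2.1 else s) 0)))

-- ===== PRECONDITION & SPEC =====
def Spec_column_store_aggregate (rows : List (Int × Int × String × Int × String)) (out : List (String × Int)) : Prop := out = column_store_aggregate_alt rows
instance (rows : List (Int × Int × String × Int × String)) (out : List (String × Int)) : Decidable (Spec_column_store_aggregate rows out) := by unfold Spec_column_store_aggregate; infer_instance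

-- ===== CLAIM (what is proved, stated in full; the proofs are below) =====
def Claim_equal_column_store_aggregate : Prop := ∀ (rows : List (Int × Int × String × Int × String)), Dom_column_store_aggregate rows → Spec_column_store_aggregate rows (column_store_aggregate rows)

-- ===== LEMMAS AND PROOFS =====

-- A's indexed loop over the three materialized columns is the row-wise loop over the paid rows
theorem column_store_aggregate_eq_filter_fold (rows : List (Int × Int × String × Int × String)) :
    column_store_aggregate rows
      = PySem.List.sorted2 (((rows.filter (fun r => r.2.2.1 == "paid")).foldl
          (fun d r => d.modify r.2.2.2.2 0 (· + r.2.2.2.1)) PySem.Dict.empty).items)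
          (fun p => p.1) (fun p => p.2) false := by
  unfold column_store_aggregate
  have h1 : ∀ i : Int, PySem.List.pyGetD (rows.map (fun r => r.2.2.1)) i ""
      = (PySem.List.pyGetD rows i ((0:Int), (0:Int), "", (0:Int), "")).2.2.1 :=
    fun i => PySem.List.pyGetD_map (fun r => r.2.2.1) rows i ((0:Int), (0:Int), "", (0:Int), "")
  have h2 : ∀ i : Int, PySem.List.pyGetD (rows.map (fun r => r.2.2.2.1)) i 0
      = (PySem.List.pyGetD rows i ((0:Int), (0:Int), "", (0:Int), "")).2.2.2.1 :=
    fun i => PySem.List.pyGetD_map (fun r => r.2.2.2.1) rows i ((0:Int), (0:Int), "", (0:Int), "")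
  have h3 : ∀ i : Int, PySem.List.pyGetD (rows.map (fun r => r.2.2.2.2)) i ""
      = (PySem.List.pyGetD rows i ((0:Int), (0:Int), "", (0:Int), "")).2.2.2.2 :=
    fun i => PySem.List.pyGetD_map (fun r => r.2.2.2.2) rows i ((0:Int), (0:Int), "", (0:Int), "")
  simp only [h1, h2, h3]
  have hlen : PySem.List.len rows = (rows.length : Int) := rfl
  rw [hlen,
    PySem.List.foldl_pyRange_zero_pyGetD' rows ((0:Int), (0:Int), "", (0:Int), "")
      (fun d r => if r.2.2.1 == "paid" then d.modify r.2.2.2.2 0 (· + r.2.2.2.1) else d)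
      PySem.Dict.empty,
    PySem.List.foldl_if_eq_foldl_filter]

-- lookup in the defaultdict-accumulate loop is the sum over the matching rows
theorem getD_foldl_modify_add (l : List (Int × Int × String × Int × String))
    (d : PySem.Dict String Int) (c : String) :
    (l.foldl (fun d r => d.modify r.2.2.2.2 0 (· + r.2.2.2.1)) d).getD c 0
      = d.getD c 0 + ((l.filter (fun r => r.2.2.2.2 == c)).map (fun r => r.2.2.2.1)).sum := by
  induction l generalizing d with
  | nil => simp
  | cons x t ih =>
    simp only [List.foldl_cons, ih, List.filter_cons]
    by_cases hx : x.2.2.2.2 = c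
    · simp [hx]
      ring
    · simp [hx]
      rw [PySem.Dict.getD_modify_of_ne d 0 (fun v => v + x.2.2.2.1) (fun h => hx h.symm)]

-- A = B pointwise (Dom is not needed: the two programs agree on every input)
theorem column_store_aggregate_main (rows : List (Int × Int × String × Int × String)) :
    column_store_aggregate rows = column_store_aggregate_alt rows := by
  -- sorted2 with fst/snd keys is the sort by the lexicographic order on the pair
  have hcmp : ∀ xs : List (String × Int),
      PySem.List.sorted2 xs (fun p => p.1) (fun p => p.2) false
        = PySem.List.sorted xs (fun p => toLex (p.1, p.2)) false := by
    intro xs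
    unfold PySem.List.sorted2 PySem.List.sorted
    simp only [Bool.false_eq_true, if_false]
    congr 1
    funext acc x
    congr 1
    funext a b
    rcases lt_trichotomy a.1 b.1 with h | h | h
    · simp [Prod.Lex.lt_iff, h]
    · simp [Prod.Lex.lt_iff, h]
    · simp [Prod.Lex.lt_iff, h, lt_asymm h, h.ne']
  show column_store_aggregate rows =
    (PySem.List.sorted (PySem.Set.ofList ((rows.filter (fun r => r.2.2.1 == "paid")).map (fun r => r.2.2.2.2))) (fun c => c) false).map
      (fun c => (c, ((rows.filter (fun r => r.2.2.1 == "paid")).foldl (fun s r => if r.2.2.2.2 == c then s + r.2.2.2.1 else s) 0)))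
  set paid := rows.filter (fun r => r.2.2.1 == "paid") with hpaid
  set agg := paid.foldl (fun d r => d.modify r.2.2.2.2 0 (· + r.2.2.2.1)) PySem.Dict.empty with hagg
  set K := PySem.Set.ofList (paid.map (fun r => r.2.2.2.2)) with hK
  have hkeys : agg.keys = K := by
    rw [hagg, PySem.Dict.keys_foldl_modify_key paid (fun r => r.2.2.2.2) 0
        (fun d r v => v + r.2.2.2.1) PySem.Dict.empty]
    rw [hK, PySem.Set.ofList_eq_foldl]
    rfl
  have hnd : agg.keys.Nodup := by rw [hkeys, hK]; exact PySem.Set.nodup_ofList _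
  have hval : ∀ c, agg.getD c 0
      = ((paid.filter (fun r => r.2.2.2.2 == c)).map (fun r => r.2.2.2.1)).sum := by
    intro c; rw [hagg, getD_foldl_modify_add]; simp
  have hitems : agg.items = K.map (fun k => (k, agg.getD k 0)) := by
    rw [PySem.Dict.items_eq_map_keys agg hnd 0, hkeys]
  have hsum : ∀ c, paid.foldl (fun s r => if r.2.2.2.2 == c then s + r.2.2.2.1 else s) 0
      = agg.getD c 0 := by
    intro c
    rw [PySem.List.foldl_if_eq_foldl_filter (fun r => r.2.2.2.2 == c)
        (fun s r => s + r.2.2.2.1) paid 0, PySem.List.foldl_add, hval c]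
    simp
  rw [column_store_aggregate_eq_filter_fold, ← hpaid, ← hagg, hitems, hcmp]
  have hmap : ((PySem.List.sorted K (fun c => c) false).map
      (fun c => (c, paid.foldl (fun s r => if r.2.2.2.2 == c then s + r.2.2.2.1 else s) 0)))
      = (PySem.List.sorted K (fun c => c) false).map (fun k => (k, agg.getD k 0)) :=
    List.map_congr_left (fun c _ => by rw [hsum c])
  rw [hmap]
  apply PySem.List.sorted_eq_of_perm_of_pairwise_lt
  · exact ((PySem.List.sorted_perm K (fun c => c) false).map _)
  · have hle : (PySem.List.sorted K (fun c => c) false).Pairwise (· ≤ ·) :=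
      PySem.List.sorted_pairwise K (fun c => c)
    have hndS : (PySem.List.sorted K (fun c => c) false).Nodup :=
      ((PySem.List.sorted_perm K (fun c => c) false).nodup_iff).mpr (by rw [hK]; exact PySem.Set.nodup_ofList _)
    have hlt : (PySem.List.sorted K (fun c => c) false).Pairwise (· < ·) :=
      (hle.and hndS).imp (fun h => lt_of_le_of_ne h.1 h.2)
    rw [List.pairwise_map]
    exact hlt.imp (fun h => Prod.Lex.lt_iff.mpr (Or.inl h))

-- ===== VERDICT (by name: the statement is the Claim_ definition above) =====
theorem column_store_aggregate_spec : Claim_equal_column_store_aggregate :=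
  fun rows _ => column_store_aggregate_main rows
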